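-- pv_equiv track=rewrite | github.com/thedejijoseph/jack | app/core.py | serve
-- ===== SOURCE A (Python) =====
-- import types
--
-- def serve(bowls):
-- 	"""Re-orders argument alphabetically.
-- 	serve(arg) >> sorted_list
-- 	Where arg could be a generator or a list.
-- 	"""
-- 	queue = []
--
-- 	if isinstance(bowls, types.GeneratorType):
-- 		# arg is a generator
-- 		# already cut into bowls of same size
-- 		for bowl in bowls:
-- 			if bowl is []:
-- 				pass
-- 			bl = list(set(bowl))
-- 			bl.sort()
-- 			queue.extend(bl)
-- 		return queue
--
-- 	# not a generator
-- 	# cut list into lists of words the same size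
-- 	# [['ae', 'ea'], ['eat', 'tea'], [4], [5], ...]
--
-- 	stretch = 0
-- 	for i in bowls:
-- 		if len(i) > stretch:
-- 			stretch = len(i)
--
-- 	for i in range(2, stretch + 1):
-- 		grp = [x for x in filter(lambda k: True if i == len(k) else False, set(bowls))]
-- 		grp.sort()
-- 		queue.extend(grp)
--
-- 	return queue
-- ===== SOURCE B (Python) =====
-- def serve(bowls):
--     """Re-orders argument alphabetically.
--     serve(arg) >> sorted_list
--     Where arg could be a generator or a list.
--     """
--     return sorted((w for w in set(bowls) if len(w) >= 2),
--                   key=lambda w: (len(w), w))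
-- ===== Notes on version B (the rewrite author's own statement) =====
-- stated objective: simpler
-- what changed: A deduplicates then, for every length from 2 to the maximum, re-scans the whole deduplicated list and sorts the matching group; B deduplicates once, drops strings shorter than 2, and does a single sort keyed by (length, value).
import Mathlib
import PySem

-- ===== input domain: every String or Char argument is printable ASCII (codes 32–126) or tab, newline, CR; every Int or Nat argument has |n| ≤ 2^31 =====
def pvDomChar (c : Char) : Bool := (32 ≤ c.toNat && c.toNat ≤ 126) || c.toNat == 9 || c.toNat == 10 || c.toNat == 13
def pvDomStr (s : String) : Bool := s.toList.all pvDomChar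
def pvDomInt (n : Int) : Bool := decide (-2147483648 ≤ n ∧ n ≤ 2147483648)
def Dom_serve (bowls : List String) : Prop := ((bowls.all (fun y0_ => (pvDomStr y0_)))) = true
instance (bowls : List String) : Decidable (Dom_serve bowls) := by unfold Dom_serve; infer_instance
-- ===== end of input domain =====

-- B replaces A's per-length scan-and-sort loop (a full pass over the deduplicated input for every
-- length from 2 up to the maximum) by ONE sort of the deduplicated input under the key (length, value).

-- ===== PORT A =====
-- The Python's generator branch is unreachable for a list argument and is not ported.
def serve (bowls : List String) : List String :=
  let stretch : Int :=
    bowls.foldl (fun st i => if PySem.Str.len i > st then PySem.Str.len i else st) 0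
  (PySem.List.pyRange 2 (stretch + 1)).foldl
    (fun queue i =>
      queue ++ PySem.List.sorted
        ((PySem.Set.ofList bowls).filter (fun k => i == PySem.Str.len k))
        (fun x => x)) []

-- ===== PORT B =====
def serve_alt (bowls : List String) : List String :=
  PySem.List.sorted2
    ((PySem.Set.ofList bowls).filter (fun w => decide (2 ≤ PySem.Str.len w)))
    (fun w => PySem.Str.len w) (fun w => w)

-- ===== PRECONDITION & SPEC =====
def Spec_serve (bowls : List String) (out : List String) : Prop := out = serve_alt bowls
instance (bowls : List String) (out : List String) : Decidable (Spec_serve bowls out) := by unfold Spec_serve; infer_instance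

-- ===== CLAIM (what is proved, stated in full; the proofs are below) =====
def Claim_equal_serve : Prop := ∀ (bowls : List String), Dom_serve bowls → Spec_serve bowls (serve bowls)

-- ===== LEMMAS AND PROOFS =====

-- sorted2 (Python's sorted with the tuple key) returns the unique rearrangement that is strictly
-- increasing in the lexicographic (k1, identity) order.
theorem pv_sorted2_eq_of_perm_of_pairwise (xs ys : List String) (k1 : String → Int)
    (hperm : ys.Perm xs)
    (hpw : ys.Pairwise (fun a b => k1 a < k1 b ∨ (k1 a = k1 b ∧ a < b))) :
    PySem.List.sorted2 xs k1 (fun w => w) = ys := by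
  have hs : PySem.List.sorted2 xs k1 (fun w => w)
      = PySem.List.sorted xs (fun x => toLex (k1 x, x)) := by
    rw [PySem.List.sorted_eq_foldl_insertBy]
    unfold PySem.List.sorted2
    simp only [if_neg (by decide : ¬ (false = true))]
    have hfun : (fun (a b : String) => decide (k1 a < k1 b) || !decide (k1 b < k1 a) && decide ((fun w => w) a < (fun w => w) b))
        = (fun (a b : String) => decide (toLex (k1 a, a) < toLex (k1 b, b))) := by
      funext a b
      by_cases h1 : k1 a < k1 b <;> by_cases h2 : k1 b < k1 a <;> by_cases h3 : a < b <;>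
        simp [h1, h2, h3, Prod.Lex.lt_iff] <;> omega
    rw [hfun]
  rw [hs]
  apply PySem.List.sorted_eq_of_perm_of_pairwise_lt _ _ _ hperm
  refine hpw.imp ?_
  intro a b h
  rw [Prod.Lex.lt_iff]
  simpa using h

-- A's maximum-length loop is a fold of max: the accumulator bounds every length and stays ≥ 0.
theorem pv_stretch_spec (bowls : List String) :
    0 ≤ bowls.foldl (fun st i => if PySem.Str.len i > st then PySem.Str.len i else st) 0 ∧
    ∀ x ∈ bowls, PySem.Str.len x ≤
      bowls.foldl (fun st i => if PySem.Str.len i > st then PySem.Str.len i else st) 0 := by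
  have hf : (fun (st : Int) (i : String) => if PySem.Str.len i > st then PySem.Str.len i else st)
      = fun st i => max st (PySem.Str.len i) := by
    funext st i
    rw [max_def]
    split_ifs <;> omega
  rw [hf, ← List.foldl_map]
  have h := PySem.List.le_foldl_max (bowls.map PySem.Str.len) 0
  exact ⟨h.1, fun x hx => h.2 _ (List.mem_map_of_mem hx)⟩

-- Concatenating the per-length fibers of S over a Nodup index list is a permutation of one
-- membership filter of S.
theorem pv_flatMap_filter_perm (S : List String) (r : List Int) (hr : r.Nodup) :
    (r.flatMap (fun i => S.filter (fun k => i == PySem.Str.len k))).Perm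
      (S.filter (fun k => decide (PySem.Str.len k ∈ r))) := by
  induction r with
  | nil => simp
  | cons i r' ih =>
    rw [List.flatMap_cons]
    have hnd := (List.nodup_cons.mp hr)
    have ih' := ih hnd.2
    have hsplit : (S.filter (fun k => decide (PySem.Str.len k ∈ i :: r'))).Perm
        (S.filter (fun k => i == PySem.Str.len k) ++ S.filter (fun k => decide (PySem.Str.len k ∈ r'))) := by
      have h1 := List.filter_append_perm (fun k => i == PySem.Str.len k)
        (S.filter (fun k => decide (PySem.Str.len k ∈ i :: r')))
      rw [List.filter_filter, List.filter_filter] at h1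
      have e1 : (S.filter fun a => (i == PySem.Str.len a) && decide (PySem.Str.len a ∈ i :: r'))
          = S.filter (fun k => i == PySem.Str.len k) := by
        apply List.filter_congr
        intro x _
        have hlen : PySem.Str.len x = (x.length : Int) := by simp
        rw [hlen]
        by_cases h : i = (x.length : Int) <;> simp [h]
      have e2 : (S.filter fun a => (!(i == PySem.Str.len a)) && decide (PySem.Str.len a ∈ i :: r'))
          = S.filter (fun k => decide (PySem.Str.len k ∈ r')) := by
        apply List.filter_congr
        intro x _
        have hlen : PySem.Str.len x = (x.length : Int) := by simp
        rw [hlen]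
        by_cases h : (x.length : Int) ∈ r'
        · have hne : ¬ (i = (x.length : Int)) := fun he => hnd.1 (he ▸ h)
          simp [h, hne, Ne.symm hne]
        · by_cases h2 : i = (x.length : Int) <;> simp [h, h2, eq_comm]
      rw [e1, e2] at h1
      exact h1.symm
    exact (ih'.append_left _).trans hsplit.symm

theorem serve_eq (bowls : List String) : serve bowls = serve_alt bowls := by
  unfold serve serve_alt
  set stretch : Int :=
    bowls.foldl (fun st i => if PySem.Str.len i > st then PySem.Str.len i else st) 0 with hst
  set S : List String := PySem.Set.ofList bowls with hS
  set r : List Int := PySem.List.pyRange 2 (stretch + 1) with hr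
  set g : Int → List String :=
    fun i => PySem.List.sorted (S.filter (fun k => i == PySem.Str.len k)) (fun x => x) with hg
  rw [PySem.List.foldl_append_eq_flatMap g r []]
  rw [List.nil_append]
  have hmax := pv_stretch_spec bowls
  rw [← hst] at hmax
  have hSnd : S.Nodup := PySem.Set.nodup_ofList bowls
  -- r is strictly increasing, hence Nodup
  have hrpw : r.Pairwise (· < ·) := by
    rw [hr, PySem.List.pyRange_of_pos 2 (stretch + 1) (by omega : (0:Int) < 1)]
    rw [List.pairwise_map]
    exact List.pairwise_lt_range.imp (by intro a b h; omega)
  have hrnd : r.Nodup := hrpw.imp (fun {a b} h => ne_of_lt h)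
  -- every element of the fiber g i has length i
  have hmemg : ∀ i, ∀ x ∈ g i, PySem.Str.len x = i := by
    intro i x hx
    rw [hg, PySem.List.mem_sorted] at hx
    exact (eq_of_beq (List.mem_filter.mp hx).2).symm
  -- A's result is a permutation of B's input list
  have hperm : (r.flatMap g).Perm (S.filter (fun w => decide (2 ≤ PySem.Str.len w))) := by
    have h1 : (r.flatMap g).Perm (r.flatMap (fun i => S.filter (fun k => i == PySem.Str.len k))) := by
      clear hrpw hrnd hmemg
      induction r with
      | nil => simp
      | cons a t ih =>
        rw [List.flatMap_cons, List.flatMap_cons]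
        exact (PySem.List.sorted_perm _ _ _).append ih
    have h2 := pv_flatMap_filter_perm S r hrnd
    have h3 : (S.filter (fun k => decide (PySem.Str.len k ∈ r)))
        = S.filter (fun w => decide (2 ≤ PySem.Str.len w)) := by
      apply List.filter_congr
      intro x hx
      have hxb : x ∈ bowls := (PySem.Set.mem_ofList bowls x).mp (hS ▸ hx)
      have hle := hmax.2 x hxb
      simp only [decide_eq_decide, hr, PySem.List.mem_pyRange_one]
      omega
    exact h3 ▸ (h1.trans h2)
  -- A's result is strictly increasing in the (length, value) order
  have hpw : (r.flatMap g).Pairwise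
      (fun a b => PySem.Str.len a < PySem.Str.len b ∨
        (PySem.Str.len a = PySem.Str.len b ∧ a < b)) := by
    rw [List.flatMap_def, List.pairwise_flatten]
    constructor
    · intro l hl
      rw [List.mem_map] at hl
      obtain ⟨i, hi, rfl⟩ := hl
      have hnd : (g i).Nodup := by
        rw [(PySem.List.sorted_perm _ _ _).nodup_iff]
        exact hSnd.filter _
      have hord : (g i).Pairwise (fun a b => a ≤ b) := by
        rw [hg]
        exact PySem.List.sorted_pairwise _ _
      refine (hord.and hnd).imp_of_mem ?_
      intro a b ha hb ⟨hle, hne⟩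
      right
      exact ⟨(hmemg i a ha).trans (hmemg i b hb).symm, lt_of_le_of_ne hle hne⟩
    · rw [List.pairwise_map]
      refine hrpw.imp_of_mem ?_
      intro i j hi hj hij x hx y hy
      left
      rw [hmemg i x hx, hmemg j y hy]
      exact hij
  exact (pv_sorted2_eq_of_perm_of_pairwise _ _ _ hperm hpw).symm

-- ===== VERDICT (by name: the statement is the Claim_ definition above) =====
theorem serve_spec : Claim_equal_serve := by
  intro bowls _
  unfold Spec_serve
  exact serve_eq bowls
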